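-- pv_equiv track=rewrite | github.com/mnuman/aoc-2015 | src/day03.py | part2
-- ===== SOURCE A (Python) =====
-- def part2(data):
--     santapos: tuple[int, int] = (0, 0)
--     robopos: tuple[int, int] = (0, 0)
--     visited: set[tuple[int, int]] = {santapos}
--
--     for i, move in enumerate(data):
--         # Alternate between Santa (even indices) and Robo (odd indices)
--         if i % 2 == 0:  # Santa's turn
--             if move == "^":
--                 santapos = (santapos[0], santapos[1] + 1)
--             elif move == "v":
--                 santapos = (santapos[0], santapos[1] - 1)
--             elif move == ">":
--                 santapos = (santapos[0] + 1, santapos[1])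
--             elif move == "<":
--                 santapos = (santapos[0] - 1, santapos[1])
--             visited.add(santapos)
--         else:  # Robo's turn
--             if move == "^":
--                 robopos = (robopos[0], robopos[1] + 1)
--             elif move == "v":
--                 robopos = (robopos[0], robopos[1] - 1)
--             elif move == ">":
--                 robopos = (robopos[0] + 1, robopos[1])
--             elif move == "<":
--                 robopos = (robopos[0] - 1, robopos[1])
--             visited.add(robopos)
--
--     return len(visited)
-- ===== SOURCE B (Python) =====
-- def part2(data):
--     delta = {'^': (0, 1), 'v': (0, -1), '>': (1, 0), '<': (-1, 0)}
--
--     def walk(moves):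
--         x = y = 0
--         cells = set()
--         for m in moves:
--             dx, dy = delta.get(m, (0, 0))
--             x, y = x + dx, y + dy
--             cells.add((x, y))
--         return cells
--
--     return len({(0, 0)} | walk(data[0::2]) | walk(data[1::2]))
-- ===== Notes on version B (the rewrite author's own statement) =====
-- stated objective: alternative
-- what changed: Replaces the single parity-interleaved pass with two independent passes: the input is sliced into data[0::2] and data[1::2], each agent's visited cells are collected by walking its own subsequence, and the answer is the size of the union of both trails with the origin.
import Mathlib
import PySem

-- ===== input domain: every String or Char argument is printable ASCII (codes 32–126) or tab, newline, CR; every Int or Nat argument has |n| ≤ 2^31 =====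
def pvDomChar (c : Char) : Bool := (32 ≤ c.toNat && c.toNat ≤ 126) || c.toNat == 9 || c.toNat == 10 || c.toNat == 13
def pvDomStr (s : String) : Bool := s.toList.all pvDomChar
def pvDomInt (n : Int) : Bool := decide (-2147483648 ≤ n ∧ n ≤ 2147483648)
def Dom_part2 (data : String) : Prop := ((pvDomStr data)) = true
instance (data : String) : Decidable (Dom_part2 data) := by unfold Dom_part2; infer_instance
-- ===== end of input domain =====

-- B replaces A's single parity-interleaved pass with two independent walks over the slices
-- data[0::2] and data[1::2], returning the size of the union of the two trails and the origin
-- (objective: alternative decomposition; same cost).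

-- ===== PORT A =====
-- loop body of A's for-loop, as a named step function over the state (santapos, robopos, visited)
def part2Step (st : (Int × Int) × (Int × Int) × PySem.Set (Int × Int)) (im : Int × Char) :
    (Int × Int) × (Int × Int) × PySem.Set (Int × Int) :=
  if im.1 % 2 == 0 then
    let santapos :=
      if im.2 == '^' then (st.1.1, st.1.2 + 1)
      else if im.2 == 'v' then (st.1.1, st.1.2 - 1)
      else if im.2 == '>' then (st.1.1 + 1, st.1.2)
      else if im.2 == '<' then (st.1.1 - 1, st.1.2)
      else st.1
    (santapos, st.2.1, PySem.Set.add st.2.2 santapos)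
  else
    let robopos :=
      if im.2 == '^' then (st.2.1.1, st.2.1.2 + 1)
      else if im.2 == 'v' then (st.2.1.1, st.2.1.2 - 1)
      else if im.2 == '>' then (st.2.1.1 + 1, st.2.1.2)
      else if im.2 == '<' then (st.2.1.1 - 1, st.2.1.2)
      else st.2.1
    (st.1, robopos, PySem.Set.add st.2.2 robopos)

def part2 (data : String) : Int :=
  let final := (PySem.List.enumerate data.toList 0).foldl part2Step
    (((0 : Int), (0 : Int)), ((0 : Int), (0 : Int)), PySem.Set.ofList [((0 : Int), (0 : Int))])
  PySem.Set.len final.2.2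

-- ===== PORT B =====
def part2AltDelta : PySem.Dict Char (Int × Int) :=
  PySem.Dict.ofList [('^', ((0 : Int), (1 : Int))), ('v', (0, -1)), ('>', (1, 0)), ('<', (-1, 0))]

-- B's inner helper walk(moves): collect the cells visited along one agent's subsequence
def part2AltWalk (moves : List Char) : PySem.Set (Int × Int) :=
  (moves.foldl
    (fun (st : (Int × Int) × PySem.Set (Int × Int)) m =>
      let d := PySem.Dict.getD part2AltDelta m (0, 0)
      let p := (st.1.1 + d.1, st.1.2 + d.2)
      (p, PySem.Set.add st.2 p))
    (((0 : Int), (0 : Int)), PySem.Set.empty)).2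

def part2_alt (data : String) : Int :=
  let s1 := (PySem.Str.slice? data (some 0) none 2).getD ""
  let s2 := (PySem.Str.slice? data (some 1) none 2).getD ""
  PySem.Set.len
    (PySem.Set.union
      (PySem.Set.union (PySem.Set.ofList [((0 : Int), (0 : Int))]) (part2AltWalk s1.toList))
      (part2AltWalk s2.toList))

-- ===== PRECONDITION & SPEC =====
def Spec_part2 (data : String) (out : Int) : Prop := out = part2_alt data
instance (data : String) (out : Int) : Decidable (Spec_part2 data out) := by unfold Spec_part2; infer_instance

-- ===== CLAIM (what is proved, stated in full; the proofs are below) =====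
def Claim_equal_part2 : Prop := ∀ (data : String), Dom_part2 data → Spec_part2 data (part2 data)

-- ===== LEMMAS AND PROOFS =====

-- the common move semantics of one arrow character
def pvMove (p : Int × Int) (c : Char) : Int × Int :=
  if c == '^' then (p.1, p.2 + 1)
  else if c == 'v' then (p.1, p.2 - 1)
  else if c == '>' then (p.1 + 1, p.2)
  else if c == '<' then (p.1 - 1, p.2)
  else p

-- the sequence of positions visited starting from p
def pvTrail (p : Int × Int) : List Char → List (Int × Int)
  | [] => []
  | c :: t => pvMove p c :: pvTrail (pvMove p c) t

mutual
def pvEvens : List Char → List Char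
  | [] => []
  | a :: t => a :: pvOdds t
def pvOdds : List Char → List Char
  | [] => []
  | _ :: t => pvEvens t
end


lemma pvMove_delta (p : Int × Int) (m : Char) :
    (p.1 + (PySem.Dict.getD part2AltDelta m (0, 0)).1,
     p.2 + (PySem.Dict.getD part2AltDelta m (0, 0)).2) = pvMove p m := by
  have hd : part2AltDelta = PySem.Dict.mk
      [('^', ((0 : Int), (1 : Int))), ('v', (0, -1)), ('>', (1, 0)), ('<', (-1, 0))] := by decide
  by_cases h1 : m = '^'
  · subst h1; simp [hd, pvMove, PySem.Dict.getD, PySem.Dict.get?_mk_cons]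
  · by_cases h2 : m = 'v'
    · subst h2; simp [hd, pvMove, PySem.Dict.getD, PySem.Dict.get?_mk_cons, sub_eq_add_neg]
    · by_cases h3 : m = '>'
      · subst h3; simp [hd, pvMove, PySem.Dict.getD, PySem.Dict.get?_mk_cons]
      · by_cases h4 : m = '<'
        · subst h4; simp [hd, pvMove, PySem.Dict.getD, PySem.Dict.get?_mk_cons, sub_eq_add_neg]
        · simp [hd, pvMove, PySem.Dict.getD, h1, h2, h3, h4,
            Ne.symm h1, Ne.symm h2, Ne.symm h3, Ne.symm h4, PySem.Dict.get?]

lemma pv_fm (l : List Char) :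
    ((List.range ((l.length + 1) / 2)).filterMap (fun k => l[2 * k]?) = pvEvens l) ∧
    ((List.range (l.length / 2)).filterMap (fun k => l[2 * k + 1]?) = pvOdds l) := by
  induction l with
  | nil => simp [pvEvens, pvOdds]
  | cons a t ih =>
    constructor
    · have hc : (t.length + 1 + 1) / 2 = t.length / 2 + 1 := by omega
      rw [List.length_cons, hc, List.range_succ_eq_map]
      simp only [List.filterMap_cons, List.filterMap_map]
      simp only [Function.comp, Nat.mul_succ, pvEvens]
      have h2 : (fun k : Nat => (a :: t)[2 * k + 2]?) = (fun k : Nat => t[2 * k + 1]?) := by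
        funext k; rw [show 2*k+2 = (2*k+1)+1 by omega]; exact List.getElem?_cons_succ
      rw [h2, ih.2]
      simp
    · rw [List.length_cons]
      have h1 : (fun k : Nat => (a :: t)[2 * k + 1]?) = (fun k : Nat => t[2 * k]?) :=
        funext fun k => List.getElem?_cons_succ
      rw [h1, pvOdds]
      exact ih.1

lemma pv_slice_evens (l : List Char) :
    PySem.List.slice? l (some 0) none 2 = some (pvEvens l) := by
  rw [← (pv_fm l).1]
  simp only [PySem.List.slice?, PySem.List.sliceIndices]
  norm_num
  have hcount : (if 0 < l.length then (((l.length : Int) + 2 - 1) / 2).toNat else 0) =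
      (l.length + 1) / 2 := by split <;> omega
  have hfun : (fun x : Nat => l[(2 * (x : Int)).toNat]?) = (fun k : Nat => l[2 * k]?) :=
    funext fun k => by rw [show ((2 * (k : Int)).toNat = 2 * k) from by omega]
  rw [hcount, hfun]

lemma pv_slice_odds (l : List Char) :
    PySem.List.slice? l (some 1) none 2 = some (pvOdds l) := by
  rcases l with _ | ⟨a, t⟩
  · decide
  · rw [← (pv_fm (a :: t)).2]
    simp only [PySem.List.slice?, PySem.List.sliceIndices]
    norm_num
    have hcount : (if 0 < t.length then (((t.length : Int) + 2 - 1) / 2).toNat else 0) =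
        (t.length + 1) / 2 := by split <;> omega
    have hfun : (fun x : Nat => (a :: t)[(1 + 2 * (x : Int)).toNat]?) =
        (fun x : Nat => t[2 * x]?) := funext fun k => by
      rw [show ((1 + 2 * (k : Int)).toNat = 2 * k + 1) from by omega]
      exact List.getElem?_cons_succ
    rw [hcount, hfun]

lemma part2Step_even (sp rp : Int × Int) (v : PySem.Set (Int × Int)) (i : Int) (c : Char)
    (h : (i % 2 == 0) = true) :
    part2Step (sp, rp, v) (i, c) = (pvMove sp c, rp, PySem.Set.add v (pvMove sp c)) := by
  simp [part2Step, pvMove, h]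

lemma part2Step_odd (sp rp : Int × Int) (v : PySem.Set (Int × Int)) (i : Int) (c : Char)
    (h : (i % 2 == 0) = false) :
    part2Step (sp, rp, v) (i, c) = (sp, pvMove rp c, PySem.Set.add v (pvMove rp c)) := by
  simp [part2Step, pvMove, h]

lemma pvA_mem (l : List Char) : ∀ (i : Nat) (sp rp : Int × Int) (v : PySem.Set (Int × Int))
    (x : Int × Int),
    (x ∈ ((PySem.List.enumerate l (i : Int)).foldl part2Step (sp, rp, v)).2.2) ↔
      (x ∈ v ∨ x ∈ pvTrail (if i % 2 = 0 then sp else rp) (pvEvens l)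
             ∨ x ∈ pvTrail (if i % 2 = 0 then rp else sp) (pvOdds l)) := by
  induction l with
  | nil => intro i sp rp v x; simp [PySem.List.enumerate, pvEvens, pvOdds, pvTrail]
  | cons c t ih =>
    intro i sp rp v x
    rw [PySem.List.enumerate_cons]
    by_cases hp : i % 2 = 0
    · have hb : ((i : Int) % 2 == 0) = true := by simp; omega
      rw [List.foldl_cons, part2Step_even _ _ _ _ _ hb,
        show ((i : Int) + 1) = ((i + 1 : Nat) : Int) by push_cast; ring, ih (i + 1)]
      have hp1 : ¬ (i + 1) % 2 = 0 := by omega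
      simp only [hp, hp1, if_true, if_false, pvEvens, pvOdds, pvTrail,
        PySem.Set.mem_add, List.mem_cons]
      tauto
    · have hb : ((i : Int) % 2 == 0) = false := by simp; omega
      rw [List.foldl_cons, part2Step_odd _ _ _ _ _ hb,
        show ((i : Int) + 1) = ((i + 1 : Nat) : Int) by push_cast; ring, ih (i + 1)]
      have hp1 : (i + 1) % 2 = 0 := by omega
      simp only [hp, hp1, if_true, if_false, pvEvens, pvOdds, pvTrail,
        PySem.Set.mem_add, List.mem_cons]
      tauto

lemma pvA_nodup (ps : List (Int × Char)) : ∀ (st : (Int × Int) × (Int × Int) × PySem.Set (Int × Int)),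
    st.2.2.Nodup → ((ps.foldl part2Step st).2.2).Nodup := by
  induction ps with
  | nil => intro st h; exact h
  | cons p t ih =>
    intro st h
    rw [List.foldl_cons]
    apply ih
    by_cases hb : (p.1 % 2 == 0) = true
    · rw [show p = (p.1, p.2) from rfl, show st = (st.1, st.2.1, st.2.2) from rfl,
        part2Step_even _ _ _ _ _ hb]
      exact PySem.Set.nodup_add _ _ h
    · rw [show p = (p.1, p.2) from rfl, show st = (st.1, st.2.1, st.2.2) from rfl,
        part2Step_odd _ _ _ _ _ (by simpa using hb)]
      exact PySem.Set.nodup_add _ _ h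

lemma pvWalkF_mem (moves : List Char) : ∀ (st : (Int × Int) × PySem.Set (Int × Int)) (x : Int × Int),
    (x ∈ (moves.foldl
      (fun (st : (Int × Int) × PySem.Set (Int × Int)) m =>
        let d := PySem.Dict.getD part2AltDelta m (0, 0)
        let p := (st.1.1 + d.1, st.1.2 + d.2)
        (p, PySem.Set.add st.2 p)) st).2) ↔ (x ∈ st.2 ∨ x ∈ pvTrail st.1 moves) := by
  induction moves with
  | nil => intro st x; simp [pvTrail]
  | cons m t ih =>
    intro st x
    rw [List.foldl_cons]
    simp only []
    rw [ih]
    simp only [pvMove_delta st.1 m, pvTrail, PySem.Set.mem_add, List.mem_cons]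
    tauto

lemma pvWalk_mem (moves : List Char) (x : Int × Int) :
    x ∈ part2AltWalk moves ↔ x ∈ pvTrail (0, 0) moves := by
  rw [part2AltWalk, pvWalkF_mem]
  simp [PySem.Set.empty]

lemma pvSlice1 (data : String) :
    ((PySem.Str.slice? data (some 0) none 2).getD "").toList = pvEvens data.toList := by
  rw [PySem.Str.slice?, PySem.Chars.slice?_eq_listSlice?, pv_slice_evens]
  simp

lemma pvSlice2 (data : String) :
    ((PySem.Str.slice? data (some 1) none 2).getD "").toList = pvOdds data.toList := by
  rw [PySem.Str.slice?, PySem.Chars.slice?_eq_listSlice?, pv_slice_odds]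
  simp

lemma part2_eq_alt (data : String) : part2 data = part2_alt data := by
  rw [part2, part2_alt]
  simp only [pvSlice1, pvSlice2]
  have hA : (((PySem.List.enumerate data.toList 0).foldl part2Step
      (((0 : Int), (0 : Int)), ((0 : Int), (0 : Int)),
        PySem.Set.ofList [((0 : Int), (0 : Int))])).2.2).Nodup :=
    pvA_nodup _ _ (PySem.Set.nodup_ofList _)
  have hB : ((PySem.Set.union
      (PySem.Set.union (PySem.Set.ofList [((0 : Int), (0 : Int))])
        (part2AltWalk (pvEvens data.toList)))
      (part2AltWalk (pvOdds data.toList)))).Nodup :=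
    PySem.Set.nodup_union _ _ (PySem.Set.nodup_union _ _ (PySem.Set.nodup_ofList _))
  have hperm := (List.perm_ext_iff_of_nodup hA hB).2 (by
    intro x
    have hm := pvA_mem data.toList 0 (0, 0) (0, 0)
      (PySem.Set.ofList [((0 : Int), (0 : Int))]) x
    simp only [Nat.cast_zero] at hm
    rw [hm]
    simp only [PySem.Set.mem_union, pvWalk_mem, PySem.Set.mem_ofList, List.mem_singleton]
    norm_num
    tauto)
  simp only [PySem.Set.len, hperm.length_eq]

-- ===== VERDICT (by name: the statement is the Claim_ definition above) =====
theorem part2_spec : Claim_equal_part2 := by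
  intro data _
  exact part2_eq_alt data
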